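-- pv_equiv track=rewrite | github.com/aklomkaew/theaterTicketManager | mySite/webapp/views.py | getRowNumber
-- ===== SOURCE A (Python) =====
-- def getRowNumber(seat):
--     end_index = len(seat) - 1
--     while end_index >= 0:
--         if not seat[end_index].isdigit():
--             break
--         end_index -= 1
--     row = seat[:end_index + 1]
--     number = seat[end_index + 1:]
--     return row, number
-- ===== SOURCE B (Python) =====
-- def getRowNumber(seat):
--     split = 0
--     for i, ch in enumerate(seat):
--         if not ch.isdigit():
--             split = i + 1
--     return seat[:split], seat[split:]
-- ===== Notes on version B (the rewrite author's own statement) =====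
-- stated objective: alternative
-- what changed: Replaces A's backward while-loop with early break by a single forward enumerate pass that records the index just after the most recent non-digit character, then slices there.
import Mathlib
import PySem

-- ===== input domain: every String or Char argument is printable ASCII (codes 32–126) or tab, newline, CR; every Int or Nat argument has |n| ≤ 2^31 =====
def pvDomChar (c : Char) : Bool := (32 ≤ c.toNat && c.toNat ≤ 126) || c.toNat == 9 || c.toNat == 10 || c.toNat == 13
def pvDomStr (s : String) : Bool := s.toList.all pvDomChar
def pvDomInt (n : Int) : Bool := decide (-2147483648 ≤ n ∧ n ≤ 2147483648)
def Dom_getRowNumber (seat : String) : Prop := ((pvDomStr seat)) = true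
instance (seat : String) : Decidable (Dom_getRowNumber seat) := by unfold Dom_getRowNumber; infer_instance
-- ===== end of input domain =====

-- B replaces A's backward while-loop (early break at the last non-digit) by one forward
-- enumerate pass recording the split point after each non-digit; same O(n) cost.

-- ===== PORT A =====
-- A's 'while end_index >= 0: …; end_index -= 1' loop; argument k is end_index + 1,
-- result is the final end_index + 1 (the split point).
def goA (cs : List Char) : Nat → Nat
  | 0 => 0
  | k+1 => if !(PySem.Chars.isdigit (cs.getD k ' ')) then k + 1 else goA cs k

def getRowNumber (seat : String) : String × String :=
  let split : Nat := goA seat.toList seat.toList.length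
  (PySem.Str.slice seat none (some (split : Int)), PySem.Str.slice seat (some (split : Int)) none)

-- ===== PORT B =====
def getRowNumber_alt (seat : String) : String × String :=
  let split : Int :=
    (PySem.List.enumerate seat.toList 0).foldl
      (fun sp p => if !(PySem.Chars.isdigit p.2) then p.1 + 1 else sp) 0
  (PySem.Str.slice seat none (some split), PySem.Str.slice seat (some split) none)

-- ===== PRECONDITION & SPEC =====
def Spec_getRowNumber (seat : String) (out : String × String) : Prop := out = getRowNumber_alt seat
instance (seat : String) (out : String × String) : Decidable (Spec_getRowNumber seat out) := by unfold Spec_getRowNumber; infer_instance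

-- ===== CLAIM (what is proved, stated in full; the proofs are below) =====
def Claim_equal_getRowNumber : Prop := ∀ (seat : String), Dom_getRowNumber seat → Spec_getRowNumber seat (getRowNumber seat)

-- ===== LEMMAS AND PROOFS =====

theorem goA_append (cs : List Char) (c : Char) (k : Nat) (hk : k ≤ cs.length) :
    goA (cs ++ [c]) k = goA cs k := by
  induction k with
  | zero => rfl
  | succ n ih =>
    have hn : n < cs.length := hk
    have hget : (cs ++ [c]).getD n ' ' = cs.getD n ' ' := by
      simp [List.getD, List.getElem?_append_left hn]
    simp only [goA, hget, ih (Nat.le_of_lt hn)]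

theorem foldB_eq_goA (cs : List Char) :
    (PySem.List.enumerate cs 0).foldl
      (fun sp p => if !(PySem.Chars.isdigit p.2) then p.1 + 1 else sp) 0
      = (goA cs cs.length : Int) := by
  induction cs using List.reverseRecOn with
  | nil => rfl
  | append_singleton cs c ih =>
    rw [PySem.List.enumerate_append, List.foldl_append, ih]
    simp only [PySem.List.enumerate_cons, PySem.List.enumerate_nil, List.foldl_cons,
      List.foldl_nil, List.length_append, List.length_singleton]
    by_cases h : PySem.Chars.isdigit c
    · simp [goA, h, goA_append cs c cs.length (Nat.le_refl _)]
    · simp [goA, h]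

-- ===== VERDICT (by name: the statement is the Claim_ definition above) =====
theorem getRowNumber_spec : Claim_equal_getRowNumber := by
  intro seat _
  unfold Spec_getRowNumber getRowNumber getRowNumber_alt
  rw [foldB_eq_goA]
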